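-- pv_equiv track=rewrite | github.com/linguosaur/gradient-syntactic-model | tagPOSphrase.py | getPOStags
-- ===== SOURCE A (Python) =====
-- def getPOStags(phrase,corpus,corpusWords,wordIndices):
-- 	posTags = []
-- 	splitPhrase = phrase.split()
-- 	firstWord = splitPhrase[0]
-- 	firstWordIndices = []
-- 	if firstWord in wordIndices:
-- 		firstWordIndices = wordIndices[firstWord]
-- 	else:
-- 		firstWordIndices = [i for i in range(len(corpusWords)) if corpusWords[i] == firstWord]
-- 		wordIndices[firstWord] = firstWordIndices # cache
-- 	for firstWordIndex in firstWordIndices: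
-- 		for i in range(1,len(splitPhrase)):
-- 			if corpusWords[firstWordIndex+i] != splitPhrase[i]:
-- 				break
-- 		else:
-- 			tagSeq = [pair[1] for pair in corpus[firstWordIndex:firstWordIndex+len(splitPhrase)]]
-- 			if tagSeq not in posTags:
-- 				posTags.append(tagSeq)
-- 	return posTags
-- ===== SOURCE B (Python) =====
-- def getPOStags(phrase, corpus, corpusWords, wordIndices):
--     words = phrase.split()
--     m = len(words)
--     w0 = words[0]
--     seen = set()
--     out = []
--     for j in range(len(corpusWords) - m + 1):
--         if corpusWords[j] == w0 and corpusWords[j:j + m] == words: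
--             tags = [pair[1] for pair in corpus[j:j + m]]
--             key = tuple(tags)
--             if key not in seen:
--                 seen.add(key)
--                 out.append(tags)
--     return out
-- ===== Notes on version B (the rewrite author's own statement) =====
-- stated objective: simpler
-- what changed: B replaces A's first-word index-list lookup (with cache construction and mutation), per-candidate element-by-element verify loop and quadratic 'tagSeq not in posTags' list dedup by one left-to-right sliding-window scan over the corpus with a slice comparison and an O(1) hash-set dedup; B never reads or mutates the wordIndices cache.
-- outside the precondition, e.g. on getPOStags('a', [('a', 'N')], ['a'], {'a': []}): A returns [], B returns [['N']]; on getPOStags('a', [('a', 'N')], ['a'], {'a': [-1]}): A returns [[]], B returns [['N']]; on getPOStags('a b', [('x', 'N'), ('a', 'V')], ['x', 'a'], {}): A raises IndexError, B returns []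
import Mathlib
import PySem

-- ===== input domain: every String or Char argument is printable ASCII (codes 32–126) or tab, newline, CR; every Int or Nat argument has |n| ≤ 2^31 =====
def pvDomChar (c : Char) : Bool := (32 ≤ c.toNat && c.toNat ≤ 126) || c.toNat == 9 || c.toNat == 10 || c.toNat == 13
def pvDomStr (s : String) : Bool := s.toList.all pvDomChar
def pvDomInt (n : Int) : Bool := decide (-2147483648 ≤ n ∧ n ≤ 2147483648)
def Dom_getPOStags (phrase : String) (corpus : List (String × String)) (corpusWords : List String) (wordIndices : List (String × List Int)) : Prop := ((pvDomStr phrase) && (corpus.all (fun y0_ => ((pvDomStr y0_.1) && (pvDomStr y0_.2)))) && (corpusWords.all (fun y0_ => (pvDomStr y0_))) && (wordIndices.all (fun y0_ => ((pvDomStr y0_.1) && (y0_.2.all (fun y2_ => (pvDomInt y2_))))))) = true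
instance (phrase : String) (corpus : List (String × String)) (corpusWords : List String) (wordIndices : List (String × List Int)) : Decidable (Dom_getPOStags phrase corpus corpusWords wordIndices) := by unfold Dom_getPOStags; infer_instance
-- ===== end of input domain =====

-- B replaces A's first-word index list + per-candidate verify + quadratic list dedup by one
-- left-to-right sliding-window scan with a hash-set dedup; B ignores the wordIndices cache
-- (A also MUTATES wordIndices in place as a cache — the equivalence here is about the return value only).

-- ===== PORT A =====
-- inner 'for i in range(1, len(splitPhrase)): if corpusWords[firstWordIndex+i] != splitPhrase[i]: break / else:'
-- (pyGetD with default "": exact on inputs admitted by Pre_, where every accessed index is in range)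
def pvACheck (cw ws : List String) (j : Int) : List Int → Bool
  | [] => true
  | i :: rest =>
    if ¬ (PySem.List.pyGetD cw (j + i) "" = PySem.List.pyGetD ws i "") then false
    else pvACheck cw ws j rest

def getPOStags (phrase : String) (corpus : List (String × String)) (corpusWords : List String) (wordIndices : List (String × List Int)) : List (List String) :=
  let splitPhrase := PySem.Str.split₀ phrase
  let firstWord := PySem.List.pyGetD splitPhrase 0 ""   -- splitPhrase[0]; the IndexError on an empty split is excluded by Pre_
  let firstWordIndices :=
    match PySem.Dict.get? (PySem.Dict.mk wordIndices) firstWord with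
    | some l => l
    | none => (PySem.List.pyRange 0 (corpusWords.length : Int) 1).filter
        (fun i => PySem.List.pyGetD corpusWords i "" == firstWord)
  firstWordIndices.foldl (fun posTags firstWordIndex =>
    if pvACheck corpusWords splitPhrase firstWordIndex
        (PySem.List.pyRange 1 (splitPhrase.length : Int) 1) then
      let tagSeq := (PySem.List.slice corpus (some firstWordIndex)
        (some (firstWordIndex + (splitPhrase.length : Int)))).map (fun pair => pair.2)
      if tagSeq ∈ posTags then posTags else posTags ++ [tagSeq]
    else posTags) []

-- ===== PORT B =====
def getPOStags_alt (phrase : String) (corpus : List (String × String)) (corpusWords : List String) (wordIndices : List (String × List Int)) : List (List String) :=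
  let words := PySem.Str.split₀ phrase
  let m := (words.length : Int)
  let w0 := PySem.List.pyGetD words 0 ""                -- words[0]; the IndexError on an empty split is excluded by Pre_
  ((PySem.List.pyRange 0 ((corpusWords.length : Int) - m + 1) 1).foldl
    (fun (st : PySem.Set (List String) × List (List String)) j =>
      if PySem.List.pyGetD corpusWords j "" = w0
          ∧ PySem.List.slice corpusWords (some j) (some (j + m)) = words then
        let tags := (PySem.List.slice corpus (some j) (some (j + m))).map (fun pair => pair.2)
        if PySem.Set.contains st.1 tags then st
        else (PySem.Set.add st.1 tags, st.2 ++ [tags])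
      else st)
    (PySem.Set.empty, [])).2

-- ===== PRECONDITION & SPEC =====
-- the positions of word w in cw, in increasing order
def pvOcc (cw : List String) (w : String) : List Int :=
  ((List.range cw.length).filter (fun i => cw.getD i "" = w)).map (fun i : Nat => (i : Int))

-- Pre_ excludes: (a) inputs where A raises IndexError — a phrase with no words, or a first-word
-- occurrence within the last len(words)-1 positions of corpusWords (A runs off the end unless an
-- earlier mismatch stops it; where it does stop early, A returns exactly what B returns anyway);
-- (b) inputs whose wordIndices entry for the first word is not the true occurrence list — A's
-- result then depends on stale/malformed cache data, which is outside the cache's contract.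
def Pre_getPOStags (phrase : String) (corpus : List (String × String)) (corpusWords : List String) (wordIndices : List (String × List Int)) : Prop :=
  let words := PySem.Str.split₀ phrase
  words ≠ [] ∧
  (PySem.Dict.get? (PySem.Dict.mk wordIndices) words.headI).getD (pvOcc corpusWords words.headI)
      = pvOcc corpusWords words.headI ∧
  ∀ j ∈ pvOcc corpusWords words.headI, j + (words.length : Int) ≤ (corpusWords.length : Int)

instance (phrase : String) (corpus : List (String × String)) (corpusWords : List String) (wordIndices : List (String × List Int)) : Decidable (Pre_getPOStags phrase corpus corpusWords wordIndices) := by unfold Pre_getPOStags; infer_instance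

def pvWitness_getPOStags : String × (List (String × String)) × List String × (List (String × List Int)) :=
  ("a b", [("a", "DT"), ("b", "NN")], ["a", "b"], [])

def Spec_getPOStags (phrase : String) (corpus : List (String × String)) (corpusWords : List String) (wordIndices : List (String × List Int)) (out : List (List String)) : Prop := out = getPOStags_alt phrase corpus corpusWords wordIndices
instance (phrase : String) (corpus : List (String × String)) (corpusWords : List String) (wordIndices : List (String × List Int)) (out : List (List String)) : Decidable (Spec_getPOStags phrase corpus corpusWords wordIndices out) := by unfold Spec_getPOStags; infer_instance

-- ===== CLAIM (what is proved, stated in full; the proofs are below) =====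
def Claim_equal_getPOStags : Prop := ∀ (phrase : String) (corpus : List (String × String)) (corpusWords : List String) (wordIndices : List (String × List Int)), Dom_getPOStags phrase corpus corpusWords wordIndices → Pre_getPOStags phrase corpus corpusWords wordIndices → Spec_getPOStags phrase corpus corpusWords wordIndices (getPOStags phrase corpus corpusWords wordIndices)

-- ===== LEMMAS AND PROOFS =====

theorem pvWitness_ok : Dom_getPOStags pvWitness_getPOStags.1 pvWitness_getPOStags.2.1 pvWitness_getPOStags.2.2.1 pvWitness_getPOStags.2.2.2 ∧ Pre_getPOStags pvWitness_getPOStags.1 pvWitness_getPOStags.2.1 pvWitness_getPOStags.2.2.1 pvWitness_getPOStags.2.2.2 := by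
  decide

theorem pvACheck_eq_all (cw ws : List String) (j : Int) (l : List Int) :
    pvACheck cw ws j l
      = l.all (fun i => PySem.List.pyGetD cw (j + i) "" == PySem.List.pyGetD ws i "") := by
  induction l with
  | nil => rfl
  | cons i rest ih =>
    simp only [pvACheck, List.all_cons, ih]
    by_cases h : PySem.List.pyGetD cw (j + i) "" = PySem.List.pyGetD ws i "" <;>
      simp [h]

theorem pvMatch_iff (cw ws : List String) (hne : ws ≠ []) (i : Nat)
    (hfit : i + ws.length ≤ cw.length) :
    (decide (cw.getD i "" = ws.headI)
        && pvACheck cw ws (i : Int) (PySem.List.pyRange 1 (ws.length : Int) 1))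
    = decide (PySem.List.pyGetD cw (i : Int) "" = PySem.List.pyGetD ws 0 ""
        ∧ PySem.List.slice cw (some (i : Int)) (some ((i : Int) + (ws.length : Int))) = ws) := by
  rcases ws with _ | ⟨a, t⟩
  · exact absurd rfl hne
  rw [pvACheck_eq_all, PySem.List.slice_natCast_add cw i (a :: t).length, Bool.eq_iff_iff]
  simp only [Bool.and_eq_true, decide_eq_true_eq, List.all_eq_true, beq_iff_eq,
    PySem.List.pyGetD_natCast, PySem.List.pyGetD_zero_cons, List.headI_cons]
  have hlen : (List.take (a :: t).length (List.drop i cw)).length = (a :: t).length := by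
    simp only [List.length_take, List.length_drop, List.length_cons] at *
    omega
  constructor
  · rintro ⟨hP, hall⟩
    refine ⟨by simpa using hP, ?_⟩
    apply List.ext_getElem hlen
    intro k h1 h2
    rw [List.getElem_take, List.getElem_drop]
    rcases k with _ | k
    · simp only [List.getElem_cons_zero]
      rw [← List.getD_eq_getElem cw "" (by simp only [List.length_cons] at hfit; omega : i + 0 < cw.length)]
      exact hP
    · have hk : ((k : Int) + 1) ∈ PySem.List.pyRange 1 ((a :: t).length : Int) 1 := by
        rw [PySem.List.mem_pyRange_one]
        constructor
        · omega
        · exact_mod_cast (by exact_mod_cast h2 : ((k + 1 : Nat) : Int) < ((a :: t).length : Int))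
      have := hall _ hk
      have hidx : (i : Int) + ((k : Int) + 1) = ((i + (k + 1) : Nat) : Int) := by push_cast; ring
      rw [hidx] at this
      have hcast : ((k : Int) + 1) = ((k + 1 : Nat) : Int) := by push_cast; ring
      rw [hcast, PySem.List.pyGetD_natCast, PySem.List.pyGetD_natCast] at this
      rw [List.getD_eq_getElem cw "" (by simp only [List.length_cons] at hfit h2; omega : i + (k + 1) < cw.length),
        List.getD_eq_getElem (a :: t) "" h2] at this
      exact this
  · rintro ⟨hP, hslice⟩
    refine ⟨by simpa using hP, ?_⟩
    intro x hx
    obtain ⟨hx1, hx2⟩ := PySem.List.mem_pyRange_one.mp hx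
    have hxk : x = ((x.toNat : Nat) : Int) := by omega
    have hklt : x.toNat < (a :: t).length := by
      have : ((a :: t).length : Int) = ((a :: t).length : Int) := rfl
      omega
    have hidx : (i : Int) + x = ((i + x.toNat : Nat) : Int) := by omega
    rw [hidx, hxk, PySem.List.pyGetD_natCast, PySem.List.pyGetD_natCast]
    simp only [Int.toNat_natCast]
    have := congrArg (fun l => l.getD x.toNat "") hslice
    simp only at this
    rw [List.getD_eq_getElem _ "" (by rw [hlen]; exact hklt),
      List.getD_eq_getElem (a :: t) "" hklt] at this
    rw [List.getElem_take, List.getElem_drop] at this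
    rw [List.getD_eq_getElem cw "" (by simp only [List.length_cons] at hfit hklt; omega : i + x.toNat < cw.length),
      List.getD_eq_getElem (a :: t) "" hklt]
    exact this

theorem pvOcc_mem (cw : List String) (w : String) (j : Int) (hj : j ∈ pvOcc cw w) :
    ∃ i : Nat, j = (i : Int) ∧ i < cw.length ∧ cw.getD i "" = w := by
  simp only [pvOcc, List.mem_map, List.mem_filter, List.mem_range, decide_eq_true_eq] at hj
  obtain ⟨i, ⟨h1, h2⟩, rfl⟩ := hj
  exact ⟨i, rfl, h1, h2⟩

theorem pvOcc_mem_of (cw : List String) (w : String) (i : Nat) (h1 : i < cw.length)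
    (h2 : cw.getD i "" = w) : ((i : Nat) : Int) ∈ pvOcc cw w := by
  simp only [pvOcc, List.mem_map, List.mem_filter, List.mem_range, decide_eq_true_eq]
  exact ⟨i, ⟨h1, h2⟩, rfl⟩

theorem filter_map_cast (p : Int → Bool) : ∀ (l : List Nat),
    (l.map (fun i : Nat => (i : Int))).filter p
      = (l.filter (fun i : Nat => p (i : Int))).map (fun i : Nat => (i : Int)) := by
  intro l
  induction l with
  | nil => rfl
  | cons a l ih =>
    simp only [List.map_cons, List.filter_cons]
    cases h : p (a : Int) <;> simp [ih]

theorem filter_range_split (n K : Nat) (p q : Nat → Bool) (hK : K ≤ n)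
    (htail : ∀ i, K ≤ i → i < n → p i = false)
    (hpq : ∀ i, i < K → p i = q i) :
    (List.range n).filter p = (List.range K).filter q := by
  rw [show n = K + (n - K) from by omega] at htail ⊢
  rw [List.range_add, List.filter_append]
  have h1 : (List.map (fun x => K + x) (List.range (K + (n - K) - K))).filter p = [] := by
    rw [List.filter_eq_nil_iff]
    intro b hb
    simp only [List.mem_map, List.mem_range] at hb
    obtain ⟨x, hx, rfl⟩ := hb
    simp [htail (K + x) (by omega) (by omega)]
  rw [show K + (n - K) - K = n - K from by omega] at h1
  rw [h1, List.append_nil]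
  exact List.filter_congr (fun i hi => hpq i (List.mem_range.mp hi))

theorem candidates_eq (cw ws : List String) (hne : ws ≠ [])
    (hfit : ∀ j ∈ pvOcc cw ws.headI, j + (ws.length : Int) ≤ (cw.length : Int)) :
    (pvOcc cw ws.headI).filter
        (fun j => pvACheck cw ws j (PySem.List.pyRange 1 (ws.length : Int) 1))
      = (PySem.List.pyRange 0 ((cw.length : Int) - (ws.length : Int) + 1) 1).filter
          (fun j => decide (PySem.List.pyGetD cw j "" = ws.headI
            ∧ PySem.List.slice cw (some j) (some (j + (ws.length : Int))) = ws)) := by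
  have hfw0 : PySem.List.pyGetD ws 0 "" = ws.headI := by
    cases ws
    · exact absurd rfl hne
    · simp [PySem.List.pyGetD_zero_cons]
  have hm : 1 ≤ ws.length := List.length_pos_iff.mpr hne
  by_cases hmn : ws.length ≤ cw.length
  case neg =>
    have hocc : pvOcc cw ws.headI = [] := by
      rw [List.eq_nil_iff_forall_not_mem]
      intro j hj
      obtain ⟨i, rfl, hi, _⟩ := pvOcc_mem cw ws.headI j hj
      have := hfit _ hj
      have : i + ws.length ≤ cw.length := by exact_mod_cast this
      omega
    have hnil : PySem.List.pyRange 0 ((cw.length : Int) - (ws.length : Int) + 1) 1 = [] :=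
      PySem.List.pyRange_one_eq_nil (by omega)
    rw [hocc, hnil]
    rfl
  case pos =>
    show (((List.range cw.length).filter (fun i => decide (cw.getD i "" = ws.headI))).map
        (fun i : Nat => (i : Int))).filter _ = _
    rw [filter_map_cast, List.filter_filter,
      show (cw.length : Int) - (ws.length : Int) + 1 = ((cw.length - ws.length + 1 : Nat) : Int)
        from by omega,
      PySem.List.pyRange_zero_natCast, filter_map_cast]
    congr 1
    apply filter_range_split _ _ _ _ (by omega)
    · intro i hKi hin
      have hP : decide (cw.getD i "" = ws.headI) = false := by
        rw [decide_eq_false_iff_not]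
        intro h
        have := hfit _ (pvOcc_mem_of cw ws.headI i hin h)
        have : i + ws.length ≤ cw.length := by exact_mod_cast this
        omega
      rw [Bool.and_eq_false_iff]
      exact Or.inr hP
    · intro i hi
      rw [Bool.and_comm]
      have := pvMatch_iff cw ws hne i (by omega)
      rwa [hfw0] at this

def pvIns (acc : List (List String)) (t : List String) : List (List String) :=
  if t ∈ acc then acc else acc ++ [t]

def pvDedup (acc : List (List String)) : List (List String) → List (List String)
  | [] => acc
  | t :: ts => pvDedup (pvIns acc t) ts

theorem foldA (chk : Int → Bool) (tg : Int → List String) :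
    ∀ (L : List Int) (acc : List (List String)),
      L.foldl (fun posTags j =>
        if chk j then (if tg j ∈ posTags then posTags else posTags ++ [tg j]) else posTags) acc
      = pvDedup acc ((L.filter chk).map tg) := by
  intro L
  induction L with
  | nil => intro acc; rfl
  | cons j L ih =>
    intro acc
    by_cases h : chk j = true
    · simp only [List.foldl_cons, List.filter_cons, h, if_true, List.map_cons]
      by_cases hm : tg j ∈ acc <;> simp [hm, pvDedup, pvIns, ih]
    · simp only [List.foldl_cons, List.filter_cons, Bool.not_eq_true] at *
      simp [h, ih]

theorem foldB (chk : Int → Prop) [DecidablePred chk] (tg : Int → List String) :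
    ∀ (L : List Int) (seen : PySem.Set (List String)) (acc : List (List String)),
      (∀ t, PySem.Set.contains seen t = true ↔ t ∈ acc) →
      (L.foldl (fun (st : PySem.Set (List String) × List (List String)) j =>
          if chk j then
            (if PySem.Set.contains st.1 (tg j) then st
             else (PySem.Set.add st.1 (tg j), st.2 ++ [tg j]))
          else st) (seen, acc)).2
        = pvDedup acc ((L.filter (fun j => decide (chk j))).map tg) := by
  intro L
  induction L with
  | nil => intro seen acc _; rfl
  | cons j L ih =>
    intro seen acc hinv
    by_cases hc : chk j
    · by_cases hs : PySem.Set.contains seen (tg j) = true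
      · have hmem : tg j ∈ acc := (hinv _).mp hs
        simp only [List.foldl_cons, List.filter_cons, hc, decide_true, if_true, hs,
          List.map_cons, pvDedup, pvIns, hmem]
        exact ih seen acc hinv
      · have hmem : tg j ∉ acc := fun h => hs ((hinv _).mpr h)
        have hinv' : ∀ t, PySem.Set.contains (PySem.Set.add seen (tg j)) t = true
            ↔ t ∈ acc ++ [tg j] := by
          intro t
          rw [PySem.Set.contains_iff, PySem.Set.mem_add, ← PySem.Set.contains_iff, hinv t]
          simp [List.mem_append]
        simp only [List.foldl_cons, List.filter_cons, hc, decide_true, if_true, hs,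
          List.map_cons, pvDedup, pvIns, hmem, ite_false, Bool.false_eq_true]
        exact ih _ _ hinv'
    · simp only [List.foldl_cons, List.filter_cons, hc, decide_false, Bool.false_eq_true,
        if_false]
      exact ih seen acc hinv

-- ===== VERDICT (by name: the statement is the Claim_ definition above) =====

theorem getPOStags_spec : Claim_equal_getPOStags := by
  intro phrase corpus cw wi _hdom hpre
  unfold Pre_getPOStags at hpre
  obtain ⟨hne, hcache, hfit⟩ := hpre
  unfold Spec_getPOStags getPOStags getPOStags_alt
  simp only []
  have hfw : PySem.List.pyGetD (PySem.Str.split₀ phrase) 0 ""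
      = (PySem.Str.split₀ phrase).headI := by
    cases h : PySem.Str.split₀ phrase
    · exact absurd h hne
    · simp [PySem.List.pyGetD_zero_cons]
  rw [hfw]
  have hfwi : (match PySem.Dict.get? (PySem.Dict.mk wi) (PySem.Str.split₀ phrase).headI with
      | some l => l
      | none => (PySem.List.pyRange 0 (cw.length : Int) 1).filter
          (fun i => PySem.List.pyGetD cw i "" == (PySem.Str.split₀ phrase).headI))
      = pvOcc cw (PySem.Str.split₀ phrase).headI := by
    cases hD : PySem.Dict.get? (PySem.Dict.mk wi) (PySem.Str.split₀ phrase).headI with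
    | some l =>
      rw [hD] at hcache
      simpa using hcache
    | none =>
      simp only []
      rw [PySem.List.pyRange_zero_natCast, filter_map_cast]
      unfold pvOcc
      congr 1
      apply List.filter_congr
      intro i _
      rw [Bool.eq_iff_iff]
      simp [PySem.List.pyGetD_natCast]
  rw [hfwi]
  rw [foldA (fun j => pvACheck cw (PySem.Str.split₀ phrase) j
        (PySem.List.pyRange 1 ((PySem.Str.split₀ phrase).length : Int) 1))
      (fun j => (PySem.List.slice corpus (some j)
        (some (j + ((PySem.Str.split₀ phrase).length : Int)))).map (fun pair => pair.2))]
  rw [foldB (fun j => PySem.List.pyGetD cw j "" = (PySem.Str.split₀ phrase).headI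
        ∧ PySem.List.slice cw (some j) (some (j + ((PySem.Str.split₀ phrase).length : Int)))
          = PySem.Str.split₀ phrase)
      (fun j => (PySem.List.slice corpus (some j)
        (some (j + ((PySem.Str.split₀ phrase).length : Int)))).map (fun pair => pair.2))
      _ PySem.Set.empty []
      (by intro t; simp [PySem.Set.empty, PySem.Set.contains])]
  rw [candidates_eq cw (PySem.Str.split₀ phrase) hne hfit]
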